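-- pv_equiv track=rewrite | github.com/tarunbommali/AI-Powered-Predictive-Cloud-Monitoring-Infrastructure-Observability-Platform | backend/app/ml_models/root_cause_analyzer.py | determine_state
-- ===== SOURCE A (Python) =====
-- def determine_state(causes):
--
--     if not causes:
--         return "healthy"
--
--     severities = [
--         c['severity']
--         for c in causes
--     ]
--
--     if 'critical' in severities:
--         return "critical"
--
--     if 'high' in severities:
--         return "warning"
--
--     return "stable"
-- ===== SOURCE B (Python) =====
-- def determine_state(causes):
--     if not causes:
--         return "healthy"
--     rank = 0
--     for c in causes:
--         s = c['severity']
--         if s == 'critical':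
--             r = 2
--         elif s == 'high':
--             r = 1
--         else:
--             r = 0
--         if r > rank:
--             rank = r
--     return ("stable", "warning", "critical")[rank]
-- ===== Notes on version B (the rewrite author's own statement) =====
-- stated objective: alternative
-- what changed: Replaces the intermediate severities list and the two sequential membership scans with a single pass that maps each severity to a numeric priority (critical=2, high=1, else 0), keeps the running maximum, and classifies the final rank.
import Mathlib
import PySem

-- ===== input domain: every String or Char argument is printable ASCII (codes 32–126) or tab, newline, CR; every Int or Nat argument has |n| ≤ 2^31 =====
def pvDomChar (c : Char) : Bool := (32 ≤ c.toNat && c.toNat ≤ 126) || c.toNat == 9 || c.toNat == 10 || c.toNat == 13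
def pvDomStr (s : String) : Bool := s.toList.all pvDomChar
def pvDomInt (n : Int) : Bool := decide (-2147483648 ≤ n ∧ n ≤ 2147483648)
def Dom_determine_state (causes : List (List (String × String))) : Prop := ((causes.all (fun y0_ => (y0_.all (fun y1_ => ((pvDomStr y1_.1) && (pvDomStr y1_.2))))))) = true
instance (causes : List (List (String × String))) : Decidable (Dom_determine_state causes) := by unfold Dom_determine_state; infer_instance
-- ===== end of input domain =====

-- ===== PORT A =====
-- B computes the same classification in one pass via a numeric max-priority instead of
-- building the severities list and scanning it twice for membership.
def determine_state (causes : List (List (String × String))) : String :=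
  if causes = [] then "healthy"
  else
    let severities := causes.map (fun c => PySem.Dict.get? (PySem.Dict.mk c) "severity")
    if (some "critical") ∈ severities then "critical"
    else if (some "high") ∈ severities then "warning"
    else "stable"

-- ===== PORT B =====
def dsRank (s : Option String) : Nat :=
  if s = some "critical" then 2 else if s = some "high" then 1 else 0

def determine_state_alt (causes : List (List (String × String))) : String :=
  if causes = [] then "healthy"
  else
    let rank := causes.foldl
      (fun m c => max m (dsRank (PySem.Dict.get? (PySem.Dict.mk c) "severity"))) 0
    if rank = 2 then "critical" else if rank = 1 then "warning" else "stable"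

-- ===== PRECONDITION & SPEC =====
-- Pre_ excludes causes missing the 'severity' key, on which Python A (and B) raise KeyError.
def Pre_determine_state (causes : List (List (String × String))) : Prop :=
  ∀ c ∈ causes, "severity" ∈ c.map Prod.fst
instance (causes : List (List (String × String))) : Decidable (Pre_determine_state causes) := by
  unfold Pre_determine_state; infer_instance
def pvWitness_determine_state : (List (List (String × String))) :=
  ([[("severity", "high")], [("severity", "low"), ("host", "a")]])
def Spec_determine_state (causes : List (List (String × String))) (out : String) : Prop := out = determine_state_alt causes
instance (causes : List (List (String × String))) (out : String) : Decidable (Spec_determine_state causes out) := by unfold Spec_determine_state; infer_instance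

-- ===== CLAIM (what is proved, stated in full; the proofs are below) =====
def Claim_equal_determine_state : Prop := ∀ (causes : List (List (String × String))), Dom_determine_state causes → Pre_determine_state causes → Spec_determine_state causes (determine_state causes)

-- ===== LEMMAS AND PROOFS =====
def dsMax (ss : List (Option String)) : Nat :=
  ss.foldl (fun m x => max m (dsRank x)) 0

theorem dsMax_acc (ss : List (Option String)) (acc : Nat) :
    ss.foldl (fun m x => max m (dsRank x)) acc = max acc (dsMax ss) := by
  induction ss generalizing acc with
  | nil => simp [dsMax]
  | cons x xs ih =>
    simp only [dsMax, List.foldl_cons]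
    rw [ih, ih (max 0 (dsRank x))]
    omega

theorem dsMax_cons (x : Option String) (xs : List (Option String)) :
    dsMax (x :: xs) = max (dsRank x) (dsMax xs) := by
  have h : dsMax (x :: xs)
      = xs.foldl (fun m y => max m (dsRank y)) (max 0 (dsRank x)) := rfl
  rw [h, dsMax_acc]
  omega

theorem dsRank_le (x : Option String) : dsRank x ≤ 2 := by
  unfold dsRank; split_ifs <;> omega

theorem dsMax_le (ss : List (Option String)) : dsMax ss ≤ 2 := by
  induction ss with
  | nil => simp [dsMax]
  | cons x xs ih =>
    rw [dsMax_cons]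
    have := dsRank_le x
    omega

theorem dsMax_eq_two (ss : List (Option String)) :
    dsMax ss = 2 ↔ (some "critical") ∈ ss := by
  induction ss with
  | nil => simp [dsMax]
  | cons x xs ih =>
    rw [dsMax_cons]
    by_cases hx : x = some "critical"
    · have hr : dsRank x = 2 := by rw [hx]; decide
      rw [hr]
      have := dsMax_le xs
      constructor
      · intro _; simp [hx]
      · intro _; omega
    · have hr : dsRank x ≤ 1 := by
        unfold dsRank; split_ifs <;> simp_all
      constructor
      · intro h
        have : dsMax xs = 2 := by omega
        simp [List.mem_cons, ih.mp this]
      · intro h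
        rcases List.mem_cons.mp h with h | h
        · exact absurd h.symm hx
        · have := ih.mpr h
          have := dsMax_le xs
          omega

theorem dsMax_eq_one (ss : List (Option String)) (hnc : (some "critical") ∉ ss) :
    dsMax ss = 1 ↔ (some "high") ∈ ss := by
  induction ss with
  | nil => simp [dsMax]
  | cons x xs ih =>
    rw [dsMax_cons]
    have hxc : x ≠ some "critical" := fun h => hnc (by simp [h])
    have hncs : (some "critical") ∉ xs := fun h => hnc (List.mem_cons_of_mem _ h)
    have hle := dsMax_le xs
    have h2 : dsMax xs ≠ 2 := fun h => hncs ((dsMax_eq_two xs).mp h)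
    by_cases hx : x = some "high"
    · have hr : dsRank x = 1 := by rw [hx]; decide
      rw [hr]
      constructor
      · intro _; simp [hx]
      · intro _; omega
    · have hr : dsRank x = 0 := by
        unfold dsRank; split_ifs <;> simp_all
      rw [hr]
      constructor
      · intro h
        have : dsMax xs = 1 := by omega
        simp [List.mem_cons, (ih hncs).mp this]
      · intro h
        rcases List.mem_cons.mp h with h | h
        · exact absurd h.symm hx
        · have := (ih hncs).mpr h
          omega

-- ===== VERDICT (by name: the statement is the Claim_ definition above) =====
theorem determine_state_spec : Claim_equal_determine_state := by
  intro causes _ _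
  unfold Spec_determine_state determine_state determine_state_alt
  by_cases h : causes = []
  · simp [h]
  · simp only [if_neg h]
    rw [show (causes.foldl
        (fun m c => max m (dsRank (PySem.Dict.get? (PySem.Dict.mk c) "severity"))) 0)
      = dsMax (causes.map (fun c => PySem.Dict.get? (PySem.Dict.mk c) "severity")) by
        rw [dsMax, List.foldl_map]]
    set ss := causes.map (fun c => PySem.Dict.get? (PySem.Dict.mk c) "severity") with hss
    have hle := dsMax_le ss
    by_cases hc : (some "critical") ∈ ss
    · simp [hc, (dsMax_eq_two ss).mpr hc]
    · have h2 : dsMax ss ≠ 2 := fun hh => hc ((dsMax_eq_two ss).mp hh)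
      by_cases hh : (some "high") ∈ ss
      · simp [hc, hh, (dsMax_eq_one ss hc).mpr hh]
      · have h1 : dsMax ss ≠ 1 := fun hh1 => hh ((dsMax_eq_one ss hc).mp hh1)
        simp [hc, hh, h2, h1]
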